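-- pv_equiv track=rewrite | github.com/PaulHoppig/JaxDiffPowerFlow | src/diffpf/io/topology_utils.py | merge_buses
-- ===== SOURCE A (Python) =====
-- def find_representative(parent: dict[int, int], bus_id: int) -> int:
--     """
--     Path-compressed Union-Find: return the canonical representative of bus_id.
--
--     Parameters
--     ----------
--     parent : dict[int, int]
--         Mutable mapping from bus_id to its current parent.
--         Modified in place by path compression.
--     bus_id : int
--         The bus whose representative is sought.
--
--     Returns
--     -------
--     int
--         The root (representative) of the equivalence class containing bus_id.
--     """
--     root = bus_id
--     while parent[root] != root:
--         root = parent[root]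
--     # Path compression: point every node directly to the root
--     current = bus_id
--     while parent[current] != root:
--         next_node = parent[current]
--         parent[current] = root
--         current = next_node
--     return root
--
-- def merge_buses(
--     bus_ids: list[int],
--     closed_switches: list[tuple[int, int]],
-- ) -> dict[int, int]:
--     """
--     Compute a mapping from each bus id to its representative.
--
--     Buses connected by closed bus-bus switches are fused into the same
--     equivalence class (Union-Find).  Buses without any switch remain
--     their own representative.
--
--     Parameters
--     ----------
--     bus_ids : list[int]
--         All bus ids in the network (arbitrary order, need not be 0-based).
--     closed_switches : list[tuple[int, int]]
--         Each tuple ``(bus_a, bus_b)`` represents a closed bus-bus switch.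
--         Both bus ids must appear in ``bus_ids``.
--
--     Returns
--     -------
--     dict[int, int]
--         Mapping ``old_bus_id -> representative_bus_id``.
--         For buses not involved in any switch the representative is the
--         bus itself (identity mapping).
--
--     Raises
--     ------
--     ValueError
--         If a switch references a bus id not listed in ``bus_ids``.
--
--     Examples
--     --------
--     >>> mapping = merge_buses([0, 1, 2, 3], [(0, 1), (2, 3)])
--     >>> # 0 and 1 share a representative; 2 and 3 share a representative
--     >>> assert mapping[0] == mapping[1]
--     >>> assert mapping[2] == mapping[3]
--     >>> assert mapping[0] != mapping[2]
--     """
--     bus_id_set = set(bus_ids)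
--
--     # Validate switch endpoints
--     for a, b in closed_switches:
--         if a not in bus_id_set:
--             raise ValueError(f"Switch endpoint {a} is not a known bus id.")
--         if b not in bus_id_set:
--             raise ValueError(f"Switch endpoint {b} is not a known bus id.")
--
--     # Initialise: each bus is its own representative
--     parent: dict[int, int] = {bid: bid for bid in bus_ids}
--
--     # Union step
--     for a, b in closed_switches:
--         ra = find_representative(parent, a)
--         rb = find_representative(parent, b)
--         if ra != rb:
--             # Merge: smaller id becomes the representative (deterministic)
--             if ra < rb:
--                 parent[rb] = ra
--             else:
--                 parent[ra] = rb
--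
--     # Build final flat mapping with path compression applied
--     return {bid: find_representative(parent, bid) for bid in bus_ids}
-- ===== SOURCE B (Python) =====
-- def merge_buses(bus_ids, closed_switches):
--     known = set(bus_ids)
--     for a, b in closed_switches:
--         if a not in known:
--             raise ValueError(f"Switch endpoint {a} is not a known bus id.")
--         if b not in known:
--             raise ValueError(f"Switch endpoint {b} is not a known bus id.")
--     # Flat label map: every bus carries its current representative directly.
--     rep = {bid: bid for bid in bus_ids}
--     for a, b in closed_switches:
--         ra, rb = rep[a], rep[b]
--         if ra != rb:
--             lo, hi = (ra, rb) if ra < rb else (rb, ra)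
--             for k in rep:
--                 if rep[k] == hi:
--                     rep[k] = lo
--     return rep
-- ===== Notes on version B (the rewrite author's own statement) =====
-- stated objective: alternative
-- what changed: Replaces the path-compressed union-find (parent forest with find/compress loops) by a flat label map: each bus stores its representative directly and every union relabels all occurrences of the larger representative to the smaller one in a single pass, so the final identity pass over the parent forest disappears.
import Mathlib
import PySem

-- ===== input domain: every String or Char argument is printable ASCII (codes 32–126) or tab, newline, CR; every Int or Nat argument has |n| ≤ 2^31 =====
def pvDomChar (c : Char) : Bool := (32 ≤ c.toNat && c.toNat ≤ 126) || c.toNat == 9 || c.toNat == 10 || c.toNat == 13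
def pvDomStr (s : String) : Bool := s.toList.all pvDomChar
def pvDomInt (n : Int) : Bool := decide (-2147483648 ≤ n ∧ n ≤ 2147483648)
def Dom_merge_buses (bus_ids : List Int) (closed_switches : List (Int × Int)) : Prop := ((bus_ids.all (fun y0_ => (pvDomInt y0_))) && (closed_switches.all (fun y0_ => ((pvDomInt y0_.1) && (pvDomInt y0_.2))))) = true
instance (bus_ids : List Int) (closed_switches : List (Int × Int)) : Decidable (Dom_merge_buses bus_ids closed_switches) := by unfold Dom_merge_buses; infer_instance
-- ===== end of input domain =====

-- B replaces A's path-compressed union-find by a flat label map relabelled on each union (alternative decomposition, same results).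

-- ===== PORT A =====
-- while parent[root] != root: root = parent[root]   (fuel only makes the loop total; under Pre_ the chain strictly decreases inside the key set, so fuel parent.size+1 is never exhausted)
def findRootA (parent : PySem.Dict Int Int) (root : Int) : Nat → Int
  | 0 => root
  | fuel+1 =>
    if parent.getD root root = root then root
    else findRootA parent (parent.getD root root) fuel

-- path compression: while parent[current] != root: next = parent[current]; parent[current] = root; current = next
def compressA (parent : PySem.Dict Int Int) (current root : Int) : Nat → PySem.Dict Int Int
  | 0 => parent
  | fuel+1 =>
    if parent.getD current current = root then parent
    else compressA (parent.insert current root) (parent.getD current current) root fuel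

-- find_representative: returns the root and the compressed parent dict
def findReprA (parent : PySem.Dict Int Int) (bus_id : Int) : Int × PySem.Dict Int Int :=
  let root := findRootA parent bus_id (parent.size + 1)
  (root, compressA parent bus_id root (parent.size + 1))

def unionStepA (parent : PySem.Dict Int Int) (sw : Int × Int) : PySem.Dict Int Int :=
  let ra := (findReprA parent sw.1).1
  let p1 := (findReprA parent sw.1).2
  let rb := (findReprA p1 sw.2).1
  let p2 := (findReprA p1 sw.2).2
  if ra ≠ rb then
    if ra < rb then p2.insert rb ra else p2.insert ra rb
  else p2

def merge_buses (bus_ids : List Int) (closed_switches : List (Int × Int)) : List (Int × Int) :=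
  let busSet := PySem.Set.ofList bus_ids
  if closed_switches.all (fun s => busSet.contains s.1 && busSet.contains s.2) then
    let parent0 := bus_ids.foldl (fun d bid => d.insert bid bid) PySem.Dict.empty
    let parent1 := closed_switches.foldl unionStepA parent0
    let fin := bus_ids.foldl
      (fun (st : PySem.Dict Int Int × PySem.Dict Int Int) bid =>
        ((st.1.insert bid (findReprA st.2 bid).1), (findReprA st.2 bid).2))
      (PySem.Dict.empty, parent1)
    fin.1.items
  else []  -- ValueError in Python: outside Pre_

-- ===== PORT B =====
-- rep[k] (KeyError if absent; under Pre_ every looked-up key is present)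
def lookupB (rep : List (Int × Int)) (k : Int) : Int :=
  match rep.find? (fun p => p.1 == k) with
  | some p => p.2
  | none => k

def stepB (rep : List (Int × Int)) (sw : Int × Int) : List (Int × Int) :=
  let ra := lookupB rep sw.1
  let rb := lookupB rep sw.2
  if ra ≠ rb then
    let lo := if ra < rb then ra else rb
    let hi := if ra < rb then rb else ra
    rep.map (fun p => if p.2 = hi then (p.1, lo) else p)
  else rep

def merge_buses_alt (bus_ids : List Int) (closed_switches : List (Int × Int)) : List (Int × Int) :=
  let known := PySem.Set.ofList bus_ids
  if closed_switches.all (fun s => known.contains s.1 && known.contains s.2) then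
    let rep0 := (PySem.Set.ofList bus_ids).map (fun bid => (bid, bid))
    closed_switches.foldl stepB rep0
  else []  -- ValueError in Python: outside Pre_

-- ===== PRECONDITION & SPEC =====
-- Pre_ excludes exactly the inputs where a switch endpoint is missing from bus_ids: both Pythons raise ValueError there.
def Pre_merge_buses (bus_ids : List Int) (closed_switches : List (Int × Int)) : Prop :=
  ∀ p ∈ closed_switches, p.1 ∈ bus_ids ∧ p.2 ∈ bus_ids
instance (bus_ids : List Int) (closed_switches : List (Int × Int)) : Decidable (Pre_merge_buses bus_ids closed_switches) := by unfold Pre_merge_buses; infer_instance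

def pvWitness_merge_buses : List Int × (List (Int × Int)) := ([0, 1, 2, 3], [(0, 1), (2, 3)])

def Spec_merge_buses (bus_ids : List Int) (closed_switches : List (Int × Int)) (out : List (Int × Int)) : Prop := out = merge_buses_alt bus_ids closed_switches
instance (bus_ids : List Int) (closed_switches : List (Int × Int)) (out : List (Int × Int)) : Decidable (Spec_merge_buses bus_ids closed_switches out) := by unfold Spec_merge_buses; infer_instance

-- ===== CLAIM (what is proved, stated in full; the proofs are below) =====
def Claim_equal_merge_buses : Prop := ∀ (bus_ids : List Int) (closed_switches : List (Int × Int)), Dom_merge_buses bus_ids closed_switches → Pre_merge_buses bus_ids closed_switches → Spec_merge_buses bus_ids closed_switches (merge_buses bus_ids closed_switches)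

-- ===== LEMMAS AND PROOFS =====

-- Coupling invariant between A's parent forest and B's flat label map, over the shared key list D
def UFInv (D : List Int) (parent : PySem.Dict Int Int) (rep : List (Int × Int)) : Prop :=
  parent.keys = D ∧ rep.map Prod.fst = D ∧
  (∀ k ∈ D, parent.getD k k ∈ D ∧ parent.getD k k ≤ k ∧
      lookupB rep (parent.getD k k) = lookupB rep k) ∧
  (∀ k ∈ D, parent.getD k k = k → lookupB rep k = k) ∧
  (∀ k ∈ D, lookupB rep k ∈ D ∧ parent.getD (lookupB rep k) (lookupB rep k) = lookupB rep k) ∧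
  (∀ k ∈ D, lookupB rep k ≤ k)

theorem lookupB_map_pair_id (l : List Int) (k : Int) :
    lookupB (l.map fun b => (b, b)) k = k := by
  induction l with
  | nil => rfl
  | cons a t ih =>
    by_cases h : a = k <;> simp [lookupB, h] <;> simpa [lookupB] using ih

theorem lookupB_cons_self (a b : Int) (t : List (Int × Int)) :
    lookupB ((a, b) :: t) a = b := by simp [lookupB, List.find?]

theorem lookupB_cons_ne (a b k : Int) (t : List (Int × Int)) (h : k ≠ a) :
    lookupB ((a, b) :: t) k = lookupB t k := by
  simp [lookupB, List.find?, (by simpa using (Ne.symm h) : (a == k) = false)]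

theorem map_fst_relabel (rep : List (Int × Int)) (hi lo : Int) :
    (rep.map (fun p => if p.2 = hi then (p.1, lo) else p)).map Prod.fst = rep.map Prod.fst := by
  simp only [List.map_map]
  exact List.map_congr_left (fun p _ => by by_cases hv : p.2 = hi <;> simp [hv])

theorem lookupB_relabel (rep : List (Int × Int)) (hi lo k : Int)
    (hk : k ∈ rep.map Prod.fst) :
    lookupB (rep.map (fun p => if p.2 = hi then (p.1, lo) else p)) k
      = if lookupB rep k = hi then lo else lookupB rep k := by
  induction rep with
  | nil => simp at hk
  | cons p t ih =>
    by_cases h : p.1 = k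
    · by_cases hv : p.2 = hi <;>
        simp [lookupB, List.find?, h, hv]
    · have hk' : k ∈ t.map Prod.fst := by
        rcases List.mem_map.mp hk with ⟨q, hq, hq1⟩
        rcases List.mem_cons.mp hq with rfl | hq2
        · exact absurd hq1 h
        · exact List.mem_map.mpr ⟨q, hq2, hq1⟩
      have h1 : lookupB ((p :: t).map (fun p => if p.2 = hi then (p.1, lo) else p)) k
          = lookupB (t.map (fun p => if p.2 = hi then (p.1, lo) else p)) k := by
        by_cases hv : p.2 = hi <;>
          simp [lookupB, hv, (by simpa using h : (p.1 == k) = false)]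
      have h2 : lookupB (p :: t) k = lookupB t k := by
        simp [lookupB, List.find?, (by simpa using h : (p.1 == k) = false)]
      rw [h1, h2, ih hk']

theorem rep_eq_map_keys (rep : List (Int × Int)) (h : (rep.map Prod.fst).Nodup) :
    rep = (rep.map Prod.fst).map (fun k => (k, lookupB rep k)) := by
  induction rep with
  | nil => rfl
  | cons p t ih =>
    obtain ⟨a, b⟩ := p
    simp only [List.map_cons] at h ⊢
    have hnd := h.of_cons
    have ha : a ∉ t.map Prod.fst := by simpa using h.notMem
    have htail : (t.map Prod.fst).map (fun k => (k, lookupB ((a, b) :: t) k)) = t := by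
      rw [List.map_congr_left (fun k hk =>
        by rw [lookupB_cons_ne a b k t (fun e => ha (e ▸ hk))] :
        ∀ k ∈ t.map Prod.fst, (k, lookupB ((a, b) :: t) k) = (k, lookupB t k))]
      exact (ih hnd).symm
    rw [lookupB_cons_self, htail]

-- getD over an insert loop whose value is a function of the key
theorem getD_foldl_insert_fun (v : Int → Int) (l : List Int) (d : PySem.Dict Int Int)
    (k dflt : Int) :
    (l.foldl (fun d b => d.insert b (v b)) d).getD k dflt
      = if k ∈ l then v k else d.getD k dflt := by
  induction l generalizing d with
  | nil => simp
  | cons a t ih =>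
    simp only [List.foldl_cons, ih, List.mem_cons]
    by_cases ht : k ∈ t
    · simp [ht]
    · by_cases hk : k = a <;> simp [ht, hk, PySem.Dict.getD_insert]


theorem r_idem (D : List Int) (parent : PySem.Dict Int Int) (rep : List (Int × Int))
    (hinv : UFInv D parent rep) (k : Int) (hk : k ∈ D) :
    lookupB rep (lookupB rep k) = lookupB rep k :=
  hinv.2.2.2.1 _ (hinv.2.2.2.2.1 k hk).1 (hinv.2.2.2.2.1 k hk).2

theorem filter_le_length_lt (D : List Int) (x y : Int) (hx : x ∈ D) (hyx : y < x) :
    (D.filter (fun d => decide (d ≤ y))).length < (D.filter (fun d => decide (d ≤ x))).length := by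
  have h1 : D.filter (fun d => decide (d ≤ y))
      = (D.filter (fun d => decide (d ≤ x))).filter (fun d => decide (d ≤ y)) := by
    rw [List.filter_filter]
    exact List.filter_congr (fun a _ => by
      by_cases h : a ≤ y <;> simp [h] <;> omega)
  rw [h1]
  exact List.length_filter_lt_length_iff_exists.mpr
    ⟨x, List.mem_filter.mpr ⟨hx, by simp⟩, by simp; omega⟩

theorem findRootA_correct (D : List Int) (rep : List (Int × Int)) :
    ∀ (fuel : Nat) (parent : PySem.Dict Int Int) (x : Int),
      UFInv D parent rep → x ∈ D →
      (D.filter (fun d => decide (d ≤ x))).length ≤ fuel →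
      findRootA parent x fuel = lookupB rep x := by
  intro fuel
  induction fuel with
  | zero =>
    intro parent x hinv hx hb
    have : x ∈ D.filter (fun d => decide (d ≤ x)) := List.mem_filter.mpr ⟨hx, by simp⟩
    have := List.length_pos_of_mem this
    omega
  | succ n ih =>
    intro parent x hinv hx hb
    simp only [findRootA]
    by_cases h : parent.getD x x = x
    · rw [if_pos h]
      exact (hinv.2.2.2.1 x hx h).symm
    · rw [if_neg h]
      obtain ⟨hmem, hle, hrep⟩ := hinv.2.2.1 x hx
      have hlt : parent.getD x x < x := lt_of_le_of_ne hle h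
      have hdec := filter_le_length_lt D x (parent.getD x x) hx hlt
      rw [ih parent _ hinv hmem (by omega)]
      exact hrep

theorem compressA_inv (D : List Int) (rep : List (Int × Int)) :
    ∀ (fuel : Nat) (parent : PySem.Dict Int Int) (x root : Int),
      UFInv D parent rep → x ∈ D → lookupB rep x = root →
      UFInv D (compressA parent x root fuel) rep := by
  intro fuel
  induction fuel with
  | zero => intro parent x root hinv hx hroot; exact hinv
  | succ n ih =>
    intro parent x root hinv hx hroot
    simp only [compressA]
    by_cases h : parent.getD x x = root
    · rw [if_pos h]; exact hinv
    · rw [if_neg h]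
      obtain ⟨hkeys, hfst, hE, hR, hR', hM⟩ := hinv
      have hrfix : lookupB rep root = root := by
        rw [← hroot]; exact r_idem D parent rep ⟨hkeys, hfst, hE, hR, hR', hM⟩ x hx
      have hrootD : root ∈ D := hroot ▸ (hR' x hx).1
      have hrootle : root ≤ x := hroot ▸ hM x hx
      have hgetD : ∀ k d0 : Int, (parent.insert x root).getD k d0
          = if k = x then root else parent.getD k d0 := fun k d0 => by
        simp [PySem.Dict.getD_insert]
      have hinv' : UFInv D (parent.insert x root) rep := by
        refine ⟨?_, hfst, ?_, ?_, ?_, hM⟩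
        · rw [PySem.Dict.keys_insert_of_contains, hkeys]
          rw [PySem.Dict.contains_eq_decide_mem_keys, hkeys]
          simpa using hx
        · intro k hk
          rw [hgetD k k]
          by_cases hkx : k = x
          · rw [if_pos hkx]
            subst hkx
            exact ⟨hrootD, hrootle, by rw [hrfix, hroot]⟩
          · rw [if_neg hkx]; exact hE k hk
        · intro k hk
          rw [hgetD k k]
          by_cases hkx : k = x
          · rw [if_pos hkx]
            subst hkx
            intro hrx; rw [hroot, hrx]
          · rw [if_neg hkx]; exact hR k hk
        · intro k hk
          refine ⟨(hR' k hk).1, ?_⟩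
          rw [hgetD]
          by_cases hkx : lookupB rep k = x
          · rw [if_pos hkx, ← hroot, ← hkx]
            exact r_idem D parent rep ⟨hkeys, hfst, hE, hR, hR', hM⟩ k hk
          · rw [if_neg hkx]; exact (hR' k hk).2
      exact ih (parent.insert x root) (parent.getD x x) root hinv'
        (hE x hx).1 ((hE x hx).2.2.trans hroot)

theorem findReprA_spec (D : List Int) (rep : List (Int × Int))
    (parent : PySem.Dict Int Int) (x : Int)
    (hinv : UFInv D parent rep) (hx : x ∈ D) :
    (findReprA parent x).1 = lookupB rep x ∧ UFInv D (findReprA parent x).2 rep := by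
  have hsize : parent.size = D.length := by
    rw [← hinv.1]; simp [PySem.Dict.size, PySem.Dict.keys]
  have hroot : findRootA parent x (parent.size + 1) = lookupB rep x := by
    apply findRootA_correct D rep (parent.size + 1) parent x hinv hx
    calc (D.filter (fun d => decide (d ≤ x))).length ≤ D.length := List.length_filter_le _ _
      _ ≤ parent.size + 1 := by omega
  constructor
  · exact hroot
  · exact compressA_inv D rep (parent.size + 1) parent x _ hinv hx hroot.symm


theorem relabel_inv (D : List Int) (parent : PySem.Dict Int Int) (rep : List (Int × Int))
    (lo hi : Int) (hinv : UFInv D parent rep)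
    (hloD : lo ∈ D) (hhiD : hi ∈ D) (hlt : lo < hi)
    (hrlo : lookupB rep lo = lo) (hrhi : lookupB rep hi = hi)
    (hglo : parent.getD lo lo = lo) (hghi : parent.getD hi hi = hi) :
    UFInv D (parent.insert hi lo)
      (rep.map (fun p => if p.2 = hi then (p.1, lo) else p)) := by
  obtain ⟨hkeys, hfst, hE, hR, hR', hM⟩ := hinv
  have hlol : ∀ k, k ∈ D → lookupB (rep.map (fun p => if p.2 = hi then (p.1, lo) else p)) k
      = if lookupB rep k = hi then lo else lookupB rep k := fun k hk =>
    lookupB_relabel rep hi lo k (hfst ▸ hk)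
  have hgetD : ∀ k d0 : Int, (parent.insert hi lo).getD k d0
      = if k = hi then lo else parent.getD k d0 := fun k d0 => by
    simp [PySem.Dict.getD_insert]
  have hlohi : lo ≠ hi := ne_of_lt hlt
  refine ⟨?_, ?_, ?_, ?_, ?_, ?_⟩
  · rw [PySem.Dict.keys_insert_of_contains, hkeys]
    rw [PySem.Dict.contains_eq_decide_mem_keys, hkeys]
    simpa using hhiD
  · rw [map_fst_relabel]; exact hfst
  · intro k hk
    rw [hgetD k k]
    by_cases hkhi : k = hi
    · subst hkhi
      rw [if_pos rfl, hlol lo hloD, hlol k hk, hrlo, if_neg hlohi, hrhi, if_pos rfl]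
      exact ⟨hloD, le_of_lt hlt, rfl⟩
    · rw [if_neg hkhi]
      obtain ⟨hm, hle, hrep⟩ := hE k hk
      exact ⟨hm, hle, by rw [hlol _ hm, hlol _ hk, hrep]⟩
  · intro k hk
    rw [hgetD k k]
    by_cases hkhi : k = hi
    · subst hkhi
      rw [if_pos rfl]
      intro hcontra; exact absurd hcontra hlohi
    · rw [if_neg hkhi]
      intro hgk
      rw [hlol k hk, hR k hk hgk, if_neg hkhi]
  · intro k hk
    rw [hlol k hk]
    by_cases hrk : lookupB rep k = hi
    · rw [if_pos hrk]
      refine ⟨hloD, ?_⟩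
      rw [hgetD]
      rw [if_neg hlohi]
      exact hglo
    · rw [if_neg hrk]
      refine ⟨(hR' k hk).1, ?_⟩
      rw [hgetD, if_neg hrk]
      exact (hR' k hk).2
  · intro k hk
    rw [hlol k hk]
    by_cases hrk : lookupB rep k = hi
    · rw [if_pos hrk]
      have := hM k hk
      omega
    · rw [if_neg hrk]; exact hM k hk

theorem unionStepA_inv (D : List Int) (rep : List (Int × Int))
    (parent : PySem.Dict Int Int) (sw : Int × Int)
    (hinv : UFInv D parent rep) (ha : sw.1 ∈ D) (hb : sw.2 ∈ D) :
    UFInv D (unionStepA parent sw) (stepB rep sw) := by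
  obtain ⟨h1a, h1i⟩ := findReprA_spec D rep parent sw.1 hinv ha
  obtain ⟨h2a, h2i⟩ := findReprA_spec D rep (findReprA parent sw.1).2 sw.2 h1i hb
  simp only [unionStepA, stepB]
  rw [h1a, h2a]
  set ra := lookupB rep sw.1 with hra
  set rb := lookupB rep sw.2 with hrb
  have hraD : ra ∈ D := (hinv.2.2.2.2.1 sw.1 ha).1
  have hrbD : rb ∈ D := (hinv.2.2.2.2.1 sw.2 hb).1
  have hrra : lookupB rep ra = ra := r_idem D parent rep hinv sw.1 ha
  have hrrb : lookupB rep rb = rb := r_idem D parent rep hinv sw.2 hb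
  have hgra : (findReprA (findReprA parent sw.1).2 sw.2).2.getD ra ra = ra :=
    hra ▸ (h2i.2.2.2.2.1 sw.1 ha).2
  have hgrb : (findReprA (findReprA parent sw.1).2 sw.2).2.getD rb rb = rb :=
    hrb ▸ (h2i.2.2.2.2.1 sw.2 hb).2
  by_cases hne : ra ≠ rb
  · rw [if_pos hne]
    by_cases hlt : ra < rb
    · rw [if_pos hlt]
      simpa [hlt, hne] using relabel_inv D _ rep ra rb h2i hraD hrbD hlt hrra hrrb hgra hgrb
    · rw [if_neg hlt]
      have hlt' : rb < ra := lt_of_le_of_ne (not_lt.mp hlt) (Ne.symm hne)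
      simpa [hlt, hne] using relabel_inv D _ rep rb ra h2i hrbD hraD hlt' hrrb hrra hgrb hgra
  · rw [if_neg hne]
    simpa [not_not.mp hne] using h2i

theorem foldl_union_inv (D : List Int) (sws : List (Int × Int)) :
    ∀ (parent : PySem.Dict Int Int) (rep : List (Int × Int)),
      (∀ p ∈ sws, p.1 ∈ D ∧ p.2 ∈ D) → UFInv D parent rep →
      UFInv D (sws.foldl unionStepA parent) (sws.foldl stepB rep) := by
  intro parent rep hmem hinv
  induction sws generalizing parent rep with
  | nil => exact hinv
  | cons s t ih =>
    simp only [List.foldl_cons]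
    exact ih _ _ (fun p hp => hmem p (List.mem_cons_of_mem s hp))
      (unionStepA_inv D rep parent s hinv (hmem s (List.mem_cons_self)).1
        (hmem s (List.mem_cons_self)).2)

theorem init_inv (bus_ids : List Int) :
    UFInv (PySem.Set.ofList bus_ids)
      (bus_ids.foldl (fun d bid => d.insert bid bid) PySem.Dict.empty)
      ((PySem.Set.ofList bus_ids).map (fun bid => (bid, bid))) := by
  have hg : ∀ k : Int, (bus_ids.foldl (fun d bid => d.insert bid bid) PySem.Dict.empty).getD k k = k := by
    intro k
    rw [getD_foldl_insert_fun (fun b => b) bus_ids PySem.Dict.empty k k]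
    split <;> simp [PySem.Dict.getD_empty]
  have hr : ∀ k : Int, lookupB ((PySem.Set.ofList bus_ids).map (fun bid => (bid, bid))) k = k :=
    fun k => lookupB_map_pair_id _ k
  refine ⟨?_, ?_, ?_, ?_, ?_, ?_⟩
  · rw [PySem.Dict.keys_foldl_insert]
    simp [PySem.Dict.keys_empty, PySem.Set.update, PySem.Set.ofList]
  · rw [List.map_map, show (Prod.fst ∘ fun bid : Int => (bid, bid)) = id from rfl, List.map_id]
  · intro k hk; simp only [hg, hr]; exact ⟨hk, le_refl k, trivial⟩
  · intro k hk _; exact hr k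
  · intro k hk; simp only [hg, hr]; exact ⟨hk, trivial⟩
  · intro k hk; simp only [hr]; exact le_refl k

theorem final_phase (D : List Int) (rep : List (Int × Int)) :
    ∀ (l : List Int) (o : PySem.Dict Int Int) (p : PySem.Dict Int Int),
      (∀ b ∈ l, b ∈ D) → UFInv D p rep →
      (l.foldl (fun (st : PySem.Dict Int Int × PySem.Dict Int Int) bid =>
          ((st.1.insert bid (findReprA st.2 bid).1), (findReprA st.2 bid).2)) (o, p)).1
        = l.foldl (fun o b => o.insert b (lookupB rep b)) o := by
  intro l
  induction l with
  | nil => intro o p _ _; rfl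
  | cons a t ih =>
    intro o p hmem hinv
    obtain ⟨h1, h2⟩ := findReprA_spec D rep p a hinv (hmem a (List.mem_cons_self))
    simp only [List.foldl_cons, h1]
    exact ih _ _ (fun b hb => hmem b (List.mem_cons_of_mem a hb)) h2

theorem items_foldl_insert_fun (v : Int → Int) (l : List Int) :
    (l.foldl (fun o b => o.insert b (v b)) PySem.Dict.empty).items
      = (PySem.Set.ofList l).map (fun k => (k, v k)) := by
  have hnd : (l.foldl (fun o b => o.insert b (v b)) PySem.Dict.empty).keys.Nodup :=
    PySem.Dict.nodup_keys_foldl_insert l (fun _ b => v b) PySem.Dict.empty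
      PySem.Dict.nodup_keys_empty
  have hkeys : (l.foldl (fun o b => o.insert b (v b)) PySem.Dict.empty).keys
      = PySem.Set.ofList l := by
    rw [PySem.Dict.keys_foldl_insert]
    simp [PySem.Dict.keys_empty, PySem.Set.update, PySem.Set.ofList]
  rw [PySem.Dict.items_eq_map_keys _ hnd 0, hkeys]
  refine List.map_congr_left (fun k hk => ?_)
  have hkl : k ∈ l := (PySem.Set.mem_ofList l k).mp hk
  rw [getD_foldl_insert_fun v l PySem.Dict.empty k 0, if_pos hkl]

theorem merge_buses_spec : Claim_equal_merge_buses := by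
  intro bus_ids closed_switches _ hpre
  unfold Spec_merge_buses merge_buses merge_buses_alt
  have hcond : closed_switches.all
      (fun s => (PySem.Set.ofList bus_ids).contains s.1 && (PySem.Set.ofList bus_ids).contains s.2) = true := by
    rw [List.all_eq_true]
    intro s hs
    obtain ⟨h1, h2⟩ := hpre s hs
    simp only [Bool.and_eq_true]
    constructor <;> rw [PySem.Set.contains] <;> simp [PySem.Set.mem_ofList, h1, h2]
  simp only [hcond, if_true]
  have hmem : ∀ p ∈ closed_switches,
      p.1 ∈ PySem.Set.ofList bus_ids ∧ p.2 ∈ PySem.Set.ofList bus_ids := fun p hp =>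
    ⟨(PySem.Set.mem_ofList _ _).mpr (hpre p hp).1, (PySem.Set.mem_ofList _ _).mpr (hpre p hp).2⟩
  have hinv1 := foldl_union_inv (PySem.Set.ofList bus_ids) closed_switches
    (bus_ids.foldl (fun d bid => d.insert bid bid) PySem.Dict.empty)
    ((PySem.Set.ofList bus_ids).map (fun bid => (bid, bid)))
    hmem (init_inv bus_ids)
  set rep1 := closed_switches.foldl stepB ((PySem.Set.ofList bus_ids).map (fun bid => (bid, bid))) with hrep1
  rw [final_phase (PySem.Set.ofList bus_ids) rep1 bus_ids PySem.Dict.empty _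
    (fun b hb => (PySem.Set.mem_ofList _ _).mpr hb) hinv1]
  rw [items_foldl_insert_fun (fun b => lookupB rep1 b) bus_ids]
  have hfst : rep1.map Prod.fst = PySem.Set.ofList bus_ids := hinv1.2.1
  have := rep_eq_map_keys rep1 (hfst ▸ PySem.Set.nodup_ofList bus_ids)
  rw [hfst] at this
  exact this.symm
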